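-- pv_equiv track=rewrite | github.com/arielbernal/gb | hetpibt/tools/diagnose_fleet_graph.py | analyze_doorways
-- ===== SOURCE A (Python) =====
-- def analyze_doorways(w, h, grid):
--     """Find doorway cells: passable cells with <=2 passable neighbors
--     that connect two larger open areas."""
--     doorways = []
--     for y in range(h):
--         for x in range(w):
--             if not grid[y][x]:
--                 continue
--             nbrs = 0
--             for dx, dy in [(-1, 0), (1, 0), (0, -1), (0, 1)]:
--                 nx, ny = x + dx, y + dy
--                 if 0 <= nx < w and 0 <= ny < h and grid[ny][nx]:
--                     nbrs += 1
--             if nbrs <= 2: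
--                 # check if it's a true doorway (has wall on both sides)
--                 h_wall = ((x == 0 or not grid[y][x-1]) or (x == w-1 or not grid[y][x+1]))
--                 v_wall = ((y == 0 or not grid[y-1][x]) or (y == h-1 or not grid[y+1][x]))
--                 if h_wall or v_wall:
--                     doorways.append((x, y, nbrs))
--     return doorways
-- ===== SOURCE B (Python) =====
-- def analyze_doorways(w, h, grid):
--     """Find doorway cells: passable cells with <=2 passable neighbors.
--     (The original wall test is redundant: a cell with all four neighbors
--     open has 4 neighbors > 2, so every cell with <=2 neighbors has a wall.)
--     Scatter pass: each open cell increments a counter for each of its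
--     in-bounds neighbors, so counts[(x, y)] = number of open neighbors of
--     (x, y); then one gather pass emits the qualifying cells row-major."""
--     counts = {}
--     for y in range(h):
--         for x in range(w):
--             if grid[y][x]:
--                 for p in ((x - 1, y), (x + 1, y), (x, y - 1), (x, y + 1)):
--                     if 0 <= p[0] < w and 0 <= p[1] < h:
--                         counts[p] = counts.get(p, 0) + 1
--     return [(x, y, counts.get((x, y), 0))
--             for y in range(h) for x in range(w)
--             if grid[y][x] and counts.get((x, y), 0) <= 2]
-- ===== Notes on version B (the rewrite author's own statement) =====
-- stated objective: alternative
-- what changed: Replaces A's per-cell neighbor gather plus its redundant two-sided wall test with a scatter pass that builds a neighbor-count dictionary (each open cell increments each of its in-bounds neighbors) followed by a plain gather of open cells with count <= 2.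
import Mathlib
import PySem

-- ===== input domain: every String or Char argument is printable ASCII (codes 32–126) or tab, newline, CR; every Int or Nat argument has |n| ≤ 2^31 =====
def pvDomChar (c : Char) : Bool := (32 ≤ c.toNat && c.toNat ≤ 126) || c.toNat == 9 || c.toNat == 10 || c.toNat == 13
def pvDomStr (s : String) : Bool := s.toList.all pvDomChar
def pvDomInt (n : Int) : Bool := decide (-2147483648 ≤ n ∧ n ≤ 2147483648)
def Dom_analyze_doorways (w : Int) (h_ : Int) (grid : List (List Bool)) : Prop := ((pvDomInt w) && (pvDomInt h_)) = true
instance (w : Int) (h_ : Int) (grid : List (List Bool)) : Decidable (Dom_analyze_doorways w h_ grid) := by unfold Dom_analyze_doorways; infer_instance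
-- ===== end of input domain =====

-- B replaces A's per-cell neighbor gather plus redundant wall test with a scatter pass
-- building a neighbor-count dictionary and a plain gather of open cells with count ≤ 2
-- (objective: alternative decomposition, same asymptotic cost).

-- ===== PORT A =====
-- grid[y][x]: exact wherever Python's access is in range; the `.getD false`
-- totalizer is only reached outside Pre_analyze_doorways (where Python raises IndexError).
def gAt (grid : List (List Bool)) (x y : Int) : Bool :=
  (((PySem.List.pyGet? grid y).bind fun r => PySem.List.pyGet? r x).getD false)

-- the inner `for dx, dy in [...]` neighbor-counting loop of A
def nbrsA (w h_ : Int) (grid : List (List Bool)) (x y : Int) : Int :=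
  ([((-1 : Int), (0 : Int)), (1, 0), (0, -1), (0, 1)]).foldl
    (fun nbrs d =>
      if decide (0 ≤ x + d.1) && decide (x + d.1 < w) && decide (0 ≤ y + d.2) &&
         decide (y + d.2 < h_) && gAt grid (x + d.1) (y + d.2)
      then nbrs + 1 else nbrs) 0

def analyze_doorways (w : Int) (h_ : Int) (grid : List (List Bool)) : List (Int × Int × Int) :=
  (PySem.List.pyRange 0 h_ 1).foldl (fun doorways y =>
    (PySem.List.pyRange 0 w 1).foldl (fun doorways x =>
      if !gAt grid x y then doorways
      else
        let nbrs := nbrsA w h_ grid x y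
        if decide (nbrs ≤ 2) then
          let h_wall := ((x == 0 || !gAt grid (x - 1) y) || (x == w - 1 || !gAt grid (x + 1) y))
          let v_wall := ((y == 0 || !gAt grid x (y - 1)) || (y == h_ - 1 || !gAt grid x (y + 1)))
          if h_wall || v_wall then doorways ++ [(x, y, nbrs)] else doorways
        else doorways) doorways) []

-- ===== PORT B =====
def nbrCells (x y : Int) : List (Int × Int) := [(x - 1, y), (x + 1, y), (x, y - 1), (x, y + 1)]

def inBounds (w h_ : Int) (p : Int × Int) : Bool :=
  decide (0 ≤ p.1) && decide (p.1 < w) && decide (0 ≤ p.2) && decide (p.2 < h_)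

-- the scatter pass: each open cell increments the count of each in-bounds neighbor
def scatterCounts (w h_ : Int) (grid : List (List Bool)) : PySem.Dict (Int × Int) Int :=
  (PySem.List.pyRange 0 h_ 1).foldl (fun counts y =>
    (PySem.List.pyRange 0 w 1).foldl (fun counts x =>
      if gAt grid x y then
        (nbrCells x y).foldl (fun counts p =>
          if inBounds w h_ p then counts.insert p (counts.getD p 0 + 1) else counts) counts
      else counts) counts) PySem.Dict.empty

def analyze_doorways_alt (w : Int) (h_ : Int) (grid : List (List Bool)) : List (Int × Int × Int) :=
  let counts := scatterCounts w h_ grid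
  (PySem.List.pyRange 0 h_ 1).flatMap fun y =>
    (PySem.List.pyRange 0 w 1).flatMap fun x =>
      if gAt grid x y && decide (counts.getD (x, y) 0 ≤ 2) then [(x, y, counts.getD (x, y) 0)]
      else []

-- ===== PRECONDITION & SPEC =====
-- Pre_ excludes exactly the inputs on which Python A raises IndexError: when
-- 0 < w and 0 < h_, the grid must have at least h_ rows and each scanned row
-- at least w entries (A reads grid[y][x] for every 0 ≤ y < h, 0 ≤ x < w).
def Pre_analyze_doorways (w : Int) (h_ : Int) (grid : List (List Bool)) : Prop :=
  0 < w → 0 < h_ →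
    (h_ ≤ (grid.length : Int) ∧ ∀ row ∈ grid.take h_.toNat, w ≤ (row.length : Int))
instance (w : Int) (h_ : Int) (grid : List (List Bool)) : Decidable (Pre_analyze_doorways w h_ grid) := by
  unfold Pre_analyze_doorways; infer_instance

def pvWitness_analyze_doorways : Int × Int × List (List Bool) :=
  (2, 2, [[true, true], [true, false]])

def Spec_analyze_doorways (w : Int) (h_ : Int) (grid : List (List Bool)) (out : List (Int × Int × Int)) : Prop := out = analyze_doorways_alt w h_ grid
instance (w : Int) (h_ : Int) (grid : List (List Bool)) (out : List (Int × Int × Int)) : Decidable (Spec_analyze_doorways w h_ grid out) := by unfold Spec_analyze_doorways; infer_instance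

-- ===== CLAIM (what is proved, stated in full; the proofs are below) =====
def Claim_equal_analyze_doorways : Prop := ∀ (w : Int) (h_ : Int) (grid : List (List Bool)), Dom_analyze_doorways w h_ grid → Pre_analyze_doorways w h_ grid → Spec_analyze_doorways w h_ grid (analyze_doorways w h_ grid)

-- ===== LEMMAS AND PROOFS =====

-- the value A's inner body appends for one cell
def aCell (w h_ : Int) (grid : List (List Bool)) (x y : Int) : List (Int × Int × Int) :=
  if !gAt grid x y then []
  else
    let nbrs := nbrsA w h_ grid x y
    if decide (nbrs ≤ 2) then
      let h_wall := ((x == 0 || !gAt grid (x - 1) y) || (x == w - 1 || !gAt grid (x + 1) y))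
      let v_wall := ((y == 0 || !gAt grid x (y - 1)) || (y == h_ - 1 || !gAt grid x (y + 1)))
      if h_wall || v_wall then [(x, y, nbrs)] else []
    else []

-- the flat list of keys B's scatter pass increments, in order
def keyList (w h_ : Int) (grid : List (List Bool)) : List (Int × Int) :=
  (PySem.List.pyRange 0 h_ 1).flatMap fun y =>
    (PySem.List.pyRange 0 w 1).flatMap fun x =>
      if gAt grid x y then (nbrCells x y).filter (inBounds w h_) else []

-- the full cell grid, row major
def cellQ (w h_ : Int) : List (Int × Int) :=
  (PySem.List.pyRange 0 h_ 1).flatMap fun y =>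
    (PySem.List.pyRange 0 w 1).map fun x => (x, y)

lemma A_flat (w h_ : Int) (grid : List (List Bool)) :
    analyze_doorways w h_ grid =
      (PySem.List.pyRange 0 h_ 1).flatMap fun y =>
        (PySem.List.pyRange 0 w 1).flatMap fun x => aCell w h_ grid x y := by
  unfold analyze_doorways
  have hrow : ∀ (y : Int) (acc : List (Int × Int × Int)),
      (PySem.List.pyRange 0 w 1).foldl (fun doorways x =>
        if !gAt grid x y then doorways
        else
          let nbrs := nbrsA w h_ grid x y
          if decide (nbrs ≤ 2) then
            let h_wall := ((x == 0 || !gAt grid (x - 1) y) || (x == w - 1 || !gAt grid (x + 1) y))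
            let v_wall := ((y == 0 || !gAt grid x (y - 1)) || (y == h_ - 1 || !gAt grid x (y + 1)))
            if h_wall || v_wall then doorways ++ [(x, y, nbrs)] else doorways
          else doorways) acc
      = acc ++ (PySem.List.pyRange 0 w 1).flatMap fun x => aCell w h_ grid x y := by
    intro y acc
    rw [show (fun (doorways : List (Int × Int × Int)) x =>
        if !gAt grid x y then doorways
        else
          let nbrs := nbrsA w h_ grid x y
          if decide (nbrs ≤ 2) then
            let h_wall := ((x == 0 || !gAt grid (x - 1) y) || (x == w - 1 || !gAt grid (x + 1) y))
            let v_wall := ((y == 0 || !gAt grid x (y - 1)) || (y == h_ - 1 || !gAt grid x (y + 1)))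
            if h_wall || v_wall then doorways ++ [(x, y, nbrs)] else doorways
          else doorways)
      = fun doorways x => doorways ++ aCell w h_ grid x y from by
        funext acc x
        simp only [aCell]
        split_ifs <;> simp]
    exact PySem.List.foldl_append_eq_flatMap _ _ _
  rw [show (fun (doorways : List (Int × Int × Int)) y =>
      (PySem.List.pyRange 0 w 1).foldl (fun doorways x =>
        if !gAt grid x y then doorways
        else
          let nbrs := nbrsA w h_ grid x y
          if decide (nbrs ≤ 2) then
            let h_wall := ((x == 0 || !gAt grid (x - 1) y) || (x == w - 1 || !gAt grid (x + 1) y))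
            let v_wall := ((y == 0 || !gAt grid x (y - 1)) || (y == h_ - 1 || !gAt grid x (y + 1)))
            if h_wall || v_wall then doorways ++ [(x, y, nbrs)] else doorways
          else doorways) doorways)
    = fun doorways y => doorways ++ ((PySem.List.pyRange 0 w 1).flatMap fun x => aCell w h_ grid x y)
    from funext fun acc => funext fun y => hrow y acc]
  rw [PySem.List.foldl_append_eq_flatMap]
  rfl

lemma scatter_eq (w h_ : Int) (grid : List (List Bool)) :
    scatterCounts w h_ grid =
      (keyList w h_ grid).foldl (fun d p => d.insert p (d.getD p 0 + 1)) PySem.Dict.empty := by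
  unfold scatterCounts keyList
  rw [List.foldl_flatMap]
  apply PySem.List.foldl_congr_mem
  intro acc y _
  rw [List.foldl_flatMap]
  apply PySem.List.foldl_congr_mem
  intro acc' x _
  by_cases hg : gAt grid x y
  · simp only [hg, if_true, PySem.List.foldl_if_eq_foldl_filter]
  · simp [hg]

lemma sum_ite_nat {α : Type} (p : α → Bool) (l : List α) :
    (l.map fun x => if p x then (1 : Nat) else 0).sum = l.countP p := by
  induction l with
  | nil => simp
  | cons a l ih => simp [List.countP_cons, ih]; omega

lemma countP_single {α : Type} [BEq α] [LawfulBEq α] (q : α → Bool) (a : α) {l : List α}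
    (hl : l.Nodup) :
    l.countP (fun x => q x && (x == a)) = if a ∈ l ∧ q a then 1 else 0 := by
  induction l with
  | nil => simp
  | cons b l ih =>
    rcases List.nodup_cons.mp hl with ⟨hb, hl'⟩
    rw [List.countP_cons]
    by_cases hba : b = a
    · subst hba
      have h0 : l.countP (fun x => q x && (x == b)) = 0 := by
        rw [List.countP_eq_zero]
        intro c hc
        simp only [Bool.and_eq_true, beq_iff_eq, not_and]
        intro _ hcb
        exact absurd (hcb ▸ hc) hb
      rw [h0]
      by_cases hq : q b = true <;> simp [hq]
    · rw [ih hl']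
      have hfalse : (q b && (b == a)) = false := by simp [hba]
      have hmem : (a ∈ b :: l) ↔ a ∈ l := by
        constructor
        · intro h
          rcases List.mem_cons.mp h with h | h
          · exact absurd h.symm hba
          · exact h
        · exact List.mem_cons_of_mem b
      simp [hfalse, hmem]

lemma countP_or_disjoint {α : Type} (p r : α → Bool) (l : List α)
    (h : ∀ x ∈ l, p x = true → r x = false) :
    l.countP (fun x => p x || r x) = l.countP p + l.countP r := by
  induction l with
  | nil => simp
  | cons a l ih =>
    simp only [List.countP_cons]
    rw [ih (fun x hx => h x (List.mem_cons_of_mem a hx))]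
    by_cases hp : p a = true
    · have hr := h a (List.mem_cons_self) hp
      simp [hp, hr]; omega
    · simp only [Bool.not_eq_true] at hp
      by_cases hr : r a = true <;> simp [hp, hr] <;> omega

lemma countP_mem_comm {α : Type} [BEq α] [LawfulBEq α] (q : α → Bool) (l s : List α)
    (hl : l.Nodup) (hs : s.Nodup) :
    l.countP (fun x => q x && s.contains x) = s.countP (fun x => q x && l.contains x) := by
  induction s with
  | nil => simp
  | cons a s ih =>
    rcases List.nodup_cons.mp hs with ⟨ha, hs'⟩
    rw [List.countP_cons]
    have hsplit : ∀ x ∈ l, (q x && (a :: s).contains x) = true ↔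
        ((q x && (x == a)) || (q x && s.contains x)) = true := by
      intro x _
      by_cases h1 : x = a <;> by_cases h2 : x ∈ s <;>
        simp [List.contains_cons, List.contains_iff_mem, h1, h2] <;> tauto

    rw [List.countP_congr hsplit]
    rw [countP_or_disjoint _ _ _ (by
      intro x _ hx
      simp only [Bool.and_eq_true, beq_iff_eq] at hx
      have hcf : s.contains x = false :=
        Bool.eq_false_iff.mpr (fun hc => ha (hx.2 ▸ List.contains_iff_mem.mp hc))
      rw [hcf, Bool.and_false])]
    rw [countP_single q a hl, ih hs']
    by_cases h1 : a ∈ l <;> by_cases h2 : q a = true <;> simp [h1, h2] <;> omega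

lemma nodup_nbrCells (x y : Int) : (nbrCells x y).Nodup := by
  simp [nbrCells, Prod.ext_iff]
  omega

lemma mem_nbr_symm (x y x0 y0 : Int) :
    (x0, y0) ∈ nbrCells x y ↔ (x, y) ∈ nbrCells x0 y0 := by
  simp [nbrCells, Prod.ext_iff]
  omega

lemma mem_cellQ (w h_ : Int) (p : Int × Int) :
    p ∈ cellQ w h_ ↔ inBounds w h_ p = true := by
  simp only [cellQ, List.mem_flatMap, List.mem_map, PySem.List.mem_pyRange_one, inBounds,
    Bool.and_eq_true, decide_eq_true_eq]
  constructor
  · rintro ⟨y, ⟨hy0, hy1⟩, x, ⟨hx0, hx1⟩, rfl⟩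
    exact ⟨⟨⟨hx0, hx1⟩, hy0⟩, hy1⟩
  · rintro ⟨⟨⟨h1, h2⟩, h3⟩, h4⟩
    exact ⟨p.2, ⟨h3, h4⟩, p.1, ⟨h1, h2⟩, rfl⟩

lemma nodup_cellQ (w h_ : Int) : (cellQ w h_).Nodup := by
  unfold cellQ
  rw [List.nodup_flatMap]
  refine ⟨?_, ?_⟩
  · intro y _
    exact (PySem.List.nodup_pyRange_one 0 w).map (by intro a b h; cases h; rfl)
  · have := PySem.List.nodup_pyRange_one 0 h_
    refine List.Pairwise.imp ?_ ((PySem.List.nodup_pyRange_one 0 h_))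
    intro y1 y2 hne p hp1 hp2
    rcases List.mem_map.mp hp1 with ⟨x1, _, rfl⟩
    rcases List.mem_map.mp hp2 with ⟨x2, _, h⟩
    exact hne (congrArg Prod.snd h.symm)

lemma count_cellKeys (w h_ : Int) (grid : List (List Bool)) (x y x0 y0 : Int)
    (hin : inBounds w h_ (x0, y0) = true) :
    ((if gAt grid x y then (nbrCells x y).filter (inBounds w h_) else []).count (x0, y0) : Nat)
      = if (gAt grid x y && (nbrCells x0 y0).contains (x, y)) = true then 1 else 0 := by
  by_cases hg : gAt grid x y
  · simp only [hg, if_true, Bool.true_and]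
    by_cases hm : (x0, y0) ∈ nbrCells x y
    · rw [List.count_filter hin, List.count_eq_one_of_mem (nodup_nbrCells x y) hm]
      simp [(mem_nbr_symm x y x0 y0).mp hm]
    · rw [List.count_eq_zero_of_not_mem (fun h => hm (List.mem_of_mem_filter h))]
      have hnc : (nbrCells x0 y0).contains (x, y) = false :=
        Bool.eq_false_iff.mpr (fun hc =>
          hm ((mem_nbr_symm x y x0 y0).mpr (List.contains_iff_mem.mp hc)))
      rw [hnc]
      simp
  · simp [hg]

lemma count_keyList (w h_ : Int) (grid : List (List Bool)) (x0 y0 : Int)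
    (hin : inBounds w h_ (x0, y0) = true) :
    ((keyList w h_ grid).count (x0, y0) : Nat)
      = (cellQ w h_).countP (fun p => gAt grid p.1 p.2 && (nbrCells x0 y0).contains p) := by
  unfold keyList cellQ
  rw [List.count_flatMap]
  rw [List.countP_flatMap]
  congr 1
  apply List.map_congr_left
  intro y _
  simp only [Function.comp]
  rw [List.count_flatMap]
  rw [List.countP_map]
  rw [show (List.count (x0, y0) ∘ fun x =>
        if gAt grid x y then (nbrCells x y).filter (inBounds w h_) else [])
    = fun x => if (gAt grid x y && (nbrCells x0 y0).contains (x, y)) = true then 1 else 0 from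
    funext fun x => count_cellKeys w h_ grid x y x0 y0 hin]
  rw [sum_ite_nat]
  rfl

lemma nbrsA_eq_countP (w h_ : Int) (grid : List (List Bool)) (x y : Int) :
    nbrsA w h_ grid x y
      = ((nbrCells x y).countP fun p => inBounds w h_ p && gAt grid p.1 p.2 : Nat) := by
  unfold nbrsA
  rw [PySem.List.foldl_if_add_one
    (fun d : Int × Int => decide (0 ≤ x + d.1) && decide (x + d.1 < w) && decide (0 ≤ y + d.2) &&
      decide (y + d.2 < h_) && gAt grid (x + d.1) (y + d.2))]
  rw [zero_add]
  congr 1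
  have hmap : nbrCells x y
      = ([((-1 : Int), (0 : Int)), (1, 0), (0, -1), (0, 1)]).map
          (fun d => (x + d.1, y + d.2)) := by
    simp only [nbrCells, List.map_cons, List.map_nil, List.cons.injEq, Prod.mk.injEq, and_true]
    norm_num
    omega
  rw [hmap, List.countP_map]
  apply List.countP_congr
  intro d _
  simp [inBounds]

lemma getD_scatter (w h_ : Int) (grid : List (List Bool)) (x0 y0 : Int)
    (hin : inBounds w h_ (x0, y0) = true) :
    (scatterCounts w h_ grid).getD (x0, y0) 0 = nbrsA w h_ grid x0 y0 := by
  rw [scatter_eq, PySem.Dict.getD_foldl_insert_add_one, PySem.Dict.getD_empty, zero_add]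
  rw [count_keyList w h_ grid x0 y0 hin]
  rw [countP_mem_comm (fun p => gAt grid p.1 p.2) _ _ (nodup_cellQ w h_) (nodup_nbrCells x0 y0)]
  rw [nbrsA_eq_countP]
  congr 1
  apply List.countP_congr
  intro p _
  constructor
  · intro h
    simp only [Bool.and_eq_true] at h ⊢
    exact ⟨(mem_cellQ w h_ p).mp (List.contains_iff_mem.mp h.2), h.1⟩
  · intro h
    simp only [Bool.and_eq_true] at h ⊢
    exact ⟨h.2, List.contains_iff_mem.mpr ((mem_cellQ w h_ p).mpr h.1)⟩

lemma wall_true (w h_ : Int) (grid : List (List Bool)) (x y : Int)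
    (hx0 : 0 ≤ x) (hx1 : x < w) (hy0 : 0 ≤ y) (hy1 : y < h_)
    (hn : nbrsA w h_ grid x y ≤ 2) :
    (((x == 0 || !gAt grid (x - 1) y) || (x == w - 1 || !gAt grid (x + 1) y)) ||
     ((y == 0 || !gAt grid x (y - 1)) || (y == h_ - 1 || !gAt grid x (y + 1)))) = true := by
  by_contra hc
  rw [Bool.not_eq_true] at hc
  simp only [Bool.or_eq_false_iff, Bool.not_eq_eq_eq_not, Bool.not_false, beq_eq_false_iff_ne,
    ne_eq] at hc
  obtain ⟨⟨⟨hxne0, g1⟩, hxnew, g2⟩, ⟨hyne0, g3⟩, hynew, g4⟩ := hc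
  have h4 : nbrsA w h_ grid x y = 4 := by
    have e1 : x + (-1 : Int) = x - 1 := by ring
    have e2 : y + (-1 : Int) = y - 1 := by ring
    simp only [nbrsA, List.foldl_cons, List.foldl_nil, e1, e2, add_zero, g1, g2, g3, g4,
      Bool.and_true]
    have c1 : (decide (0 ≤ x - 1) && decide (x - 1 < w) && decide (0 ≤ y) && decide (y < h_)) = true := by
      simp only [Bool.and_eq_true, decide_eq_true_eq]
      refine ⟨⟨⟨by omega, by omega⟩, hy0⟩, hy1⟩
    have c2 : (decide (0 ≤ x + 1) && decide (x + 1 < w) && decide (0 ≤ y) && decide (y < h_)) = true := by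
      simp only [Bool.and_eq_true, decide_eq_true_eq]
      refine ⟨⟨⟨by omega, by omega⟩, hy0⟩, hy1⟩
    have c3 : (decide (0 ≤ x) && decide (x < w) && decide (0 ≤ y - 1) && decide (y - 1 < h_)) = true := by
      simp only [Bool.and_eq_true, decide_eq_true_eq]
      refine ⟨⟨⟨hx0, hx1⟩, by omega⟩, by omega⟩
    have c4 : (decide (0 ≤ x) && decide (x < w) && decide (0 ≤ y + 1) && decide (y + 1 < h_)) = true := by
      simp only [Bool.and_eq_true, decide_eq_true_eq]
      refine ⟨⟨⟨hx0, hx1⟩, by omega⟩, by omega⟩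
    rw [c1, c2, c3, c4]
    simp
  omega

lemma main_eq (w h_ : Int) (grid : List (List Bool)) :
    analyze_doorways w h_ grid = analyze_doorways_alt w h_ grid := by
  rw [A_flat]
  show _ = analyze_doorways_alt w h_ grid
  unfold analyze_doorways_alt
  apply List.flatMap_congr
  intro y hy
  apply List.flatMap_congr
  intro x hx
  rw [PySem.List.mem_pyRange_one] at hy hx
  have hin : inBounds w h_ (x, y) = true := by
    simp only [inBounds, Bool.and_eq_true, decide_eq_true_eq]
    exact ⟨⟨⟨hx.1, hx.2⟩, hy.1⟩, hy.2⟩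
  by_cases hg : gAt grid x y
  · have hcnt := getD_scatter w h_ grid x y hin
    by_cases hn : nbrsA w h_ grid x y ≤ 2
    · have hw := wall_true w h_ grid x y hx.1 hx.2 hy.1 hy.2 hn
      simp only [aCell, hg, Bool.not_true, Bool.false_eq_true, if_false, hcnt, hw, hn,
        decide_true, if_true, Bool.true_and]
    · simp only [aCell, hg, Bool.not_true, Bool.false_eq_true, if_false, hcnt, hn,
        decide_false, if_false, Bool.true_and]
  · simp only [Bool.not_eq_true] at hg
    simp [aCell, hg]

-- ===== VERDICT (by name: the statement is the Claim_ definition above) =====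
theorem analyze_doorways_spec : Claim_equal_analyze_doorways := by
  intro w h_ grid _ _
  unfold Spec_analyze_doorways
  exact main_eq w h_ grid
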